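-- pv_equiv track=rewrite | github.com/clarencenhuang/programming-challenges | canonical_problems/longest_alt_subarray.py | longest_alt_subarray
-- ===== SOURCE A (Python) =====
-- def longest_alt_subarray(arr):
--     dp = [0] * len(arr)
--     for i in range(1, len(arr)):
--         if arr[i] * arr[i-1] < 0:
--             if dp[i-1] == 0:
--                 dp[i] = 2
--             else:
--                 dp[i] = dp[i - 1] + 1
--         else:
--             dp[i] = 0
--     v, i = max([(v, i) for i,v in enumerate(dp)])
--     return arr[i - v + 1: i + 1]
-- ===== SOURCE B (Python) =====
-- def longest_alt_subarray(arr):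
--     # Segment decomposition: stage 1 lists the cut positions where alternation
--     # breaks (plus sentinels 0 and n); stage 2 scans adjacent cut pairs as
--     # maximal alternating segments and keeps the rightmost longest one of
--     # length >= 2 (>= on equal length reproduces max()'s rightmost tie-break).
--     n = len(arr)
--     cuts = [0] + [i for i in range(1, n) if arr[i] * arr[i - 1] >= 0] + [n]
--     best_len, best_end = 0, 0
--     for s, e in zip(cuts, cuts[1:]):
--         if e - s >= 2 and e - s >= best_len:
--             best_len, best_end = e - s, e - 1
--     if best_len < 2:
--         return []
--     return arr[best_end - best_len + 1: best_end + 1]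
-- ===== Notes on version B (the rewrite author's own statement) =====
-- stated objective: alternative
-- what changed: B decomposes the array into maximal alternating segments (a staged pass listing cut positions where the sign alternation breaks, then a scan over adjacent cut pairs keeping the rightmost longest segment), instead of A's per-index run-length dp list plus a global max over enumerated pairs.
-- outside the precondition, e.g. on longest_alt_subarray([]): A raises ValueError, B returns []
import Mathlib
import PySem

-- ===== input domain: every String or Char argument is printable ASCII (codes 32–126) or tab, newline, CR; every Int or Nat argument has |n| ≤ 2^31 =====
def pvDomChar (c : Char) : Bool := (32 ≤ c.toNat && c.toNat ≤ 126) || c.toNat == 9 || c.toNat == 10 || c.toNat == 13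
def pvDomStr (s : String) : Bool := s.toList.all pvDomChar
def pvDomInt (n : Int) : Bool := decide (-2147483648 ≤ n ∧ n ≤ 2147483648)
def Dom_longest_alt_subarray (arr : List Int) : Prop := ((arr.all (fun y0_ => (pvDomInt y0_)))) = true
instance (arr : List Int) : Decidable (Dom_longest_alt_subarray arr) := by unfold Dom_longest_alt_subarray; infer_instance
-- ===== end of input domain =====

-- B replaces A's per-index run-length dp plus global max scan by a segment
-- decomposition: list the cut positions, then pick the rightmost longest segment.

-- ===== PORT A =====
-- loop body of A's 'for i in range(1, len(arr))' (indices produced by range are in bounds, so pyGetD/pySetD are exact)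
def pvStepA (arr : List Int) (dp : List Int) (i : Int) : List Int :=
  if PySem.List.pyGetD arr i 0 * PySem.List.pyGetD arr (i - 1) 0 < 0 then
    if PySem.List.pyGetD dp (i - 1) 0 = 0 then PySem.List.pySetD dp i 2
    else PySem.List.pySetD dp i (PySem.List.pyGetD dp (i - 1) 0 + 1)
  else PySem.List.pySetD dp i 0

def longest_alt_subarray (arr : List Int) : List Int :=
  let dp := (PySem.List.pyRange 1 (PySem.List.len arr) 1).foldl (pvStepA arr) (List.replicate arr.length 0)
  match PySem.List.max2? ((PySem.List.enumerate dp 0).map (fun p => (p.2, p.1))) (fun p => p.1) (fun p => p.2) with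
  | some vi => PySem.List.slice arr (some (vi.2 - vi.1 + 1)) (some (vi.2 + 1))
  | none => []  -- unreachable under Pre_: max([]) raises ValueError, excluded by Pre_

-- ===== PORT B =====
-- loop body of B's 'for s, e in zip(cuts, cuts[1:])'
def pvStepB (st : Int × Int) (p : Int × Int) : Int × Int :=
  if 2 ≤ p.2 - p.1 ∧ st.1 ≤ p.2 - p.1 then (p.2 - p.1, p.2 - 1) else st

def longest_alt_subarray_alt (arr : List Int) : List Int :=
  let n := PySem.List.len arr
  let cuts := [(0 : Int)] ++ (PySem.List.pyRange 1 n 1).filter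
      (fun i => decide (0 ≤ PySem.List.pyGetD arr i 0 * PySem.List.pyGetD arr (i - 1) 0)) ++ [n]
  let st := (cuts.zip (PySem.List.slice cuts (some 1) none)).foldl pvStepB (0, 0)
  if st.1 < 2 then [] else PySem.List.slice arr (some (st.2 - st.1 + 1)) (some (st.2 + 1))

-- ===== PRECONDITION & SPEC =====
-- Pre_ excludes only the empty list, on which A's max([]) raises ValueError.
def Pre_longest_alt_subarray (arr : List Int) : Prop := arr ≠ []
instance (arr : List Int) : Decidable (Pre_longest_alt_subarray arr) := by unfold Pre_longest_alt_subarray; infer_instance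
def pvWitness_longest_alt_subarray : List Int := [1, -2, 3]

def Spec_longest_alt_subarray (arr : List Int) (out : List Int) : Prop := out = longest_alt_subarray_alt arr
instance (arr : List Int) (out : List Int) : Decidable (Spec_longest_alt_subarray arr out) := by unfold Spec_longest_alt_subarray; infer_instance

-- ===== CLAIM (what is proved, stated in full; the proofs are below) =====
def Claim_equal_longest_alt_subarray : Prop := ∀ (arr : List Int), Dom_longest_alt_subarray arr → Pre_longest_alt_subarray arr → Spec_longest_alt_subarray arr (longest_alt_subarray arr)

-- ===== LEMMAS AND PROOFS =====

-- cut test: the alternation BREAKS at index i (for i ≥ 1)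
def pvBad (arr : List Int) (i : Nat) : Bool := decide (0 ≤ arr.getD i 0 * arr.getD (i - 1) 0)

-- A's dp value at index i, as a recursive function
def pvDp (arr : List Int) : Nat → Int
  | 0 => 0
  | i + 1 => if pvBad arr (i + 1) then 0 else if pvDp arr i = 0 then 2 else pvDp arr i + 1

-- start of the maximal alternating segment containing i
def pvStart (arr : List Int) : Nat → Nat
  | 0 => 0
  | i + 1 => if pvBad arr (i + 1) then i + 1 else pvStart arr i

-- Python's lexicographic ≤ on the (value, index) pairs A maximises over
def pvLexLe (q p : Int × Int) : Prop := q.1 < p.1 ∨ (q.1 = p.1 ∧ q.2 ≤ p.2)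

-- B's break list for loop bound m+1 (the breaks among indices 1..m)
def pvBs (arr : List Int) (m : Nat) : List Int :=
  (PySem.List.pyRange 1 ((m : Int) + 1) 1).filter
    (fun i => decide (0 ≤ PySem.List.pyGetD arr i 0 * PySem.List.pyGetD arr (i - 1) 0))

def pvLast (arr : List Int) (m : Nat) : Int := ((0 : Int) :: pvBs arr m).getLast (List.cons_ne_nil _ _)

def pvInner (arr : List Int) (m : Nat) : Int × Int :=
  (((0 : Int) :: pvBs arr m).zip (pvBs arr m)).foldl pvStepB (0, 0)

-- what B's running state means, relative to A's dp values below `bound`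
def pvGood (arr : List Int) (bound : Nat) (st : Int × Int) : Prop :=
  (st.1 = 0 ∧ st.2 = 0 ∧ ∀ j < bound, pvDp arr j = 0)
  ∨ (2 ≤ st.1 ∧ ∃ jE : Nat, st.2 = (jE : Int) ∧ jE < bound ∧ pvDp arr jE = st.1 ∧
      ∀ j < bound, pvLexLe (pvDp arr j, (j : Int)) st)

theorem pvDp_succ (arr : List Int) (i : Nat) :
    pvDp arr (i + 1) = if pvBad arr (i + 1) then 0 else if pvDp arr i = 0 then 2 else pvDp arr i + 1 := by
  rw [pvDp]

theorem pvStart_succ (arr : List Int) (i : Nat) :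
    pvStart arr (i + 1) = if pvBad arr (i + 1) then i + 1 else pvStart arr i := by
  rw [pvStart]

theorem pvStart_le (arr : List Int) (i : Nat) : pvStart arr i ≤ i := by
  induction i with
  | zero => simp [pvStart]
  | succ i ih => rw [pvStart_succ]; split <;> omega

theorem pvDp_eq (arr : List Int) (i : Nat) :
    pvDp arr i = if i = pvStart arr i then 0 else ((i - pvStart arr i : Nat) : Int) + 1 := by
  induction i with
  | zero => simp [pvDp, pvStart]
  | succ i ih =>
    have hle := pvStart_le arr i
    by_cases hb : pvBad arr (i + 1)
    · simp [pvDp_succ, pvStart_succ, hb]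
    · rw [pvDp_succ, pvStart_succ, if_neg hb, if_neg hb, ih]
      by_cases hs : i = pvStart arr i
      · have h2 : ¬ (i + 1 = pvStart arr i) := by omega
        rw [if_pos hs, if_pos rfl, if_neg h2, (by omega : i + 1 - pvStart arr i = 1)]
        norm_num
      · have h1 : ((i - pvStart arr i : Nat) : Int) + 1 ≠ 0 := by positivity
        have h2 : ¬ (i + 1 = pvStart arr i) := by omega
        rw [if_neg hs, if_neg h1, if_neg h2,
          (by omega : i + 1 - pvStart arr i = (i - pvStart arr i) + 1)]
        push_cast; ring

theorem pvStart_eq_of_le (arr : List Int) (m : Nat) :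
    ∀ j, j ≤ m → pvStart arr m ≤ j → pvStart arr j = pvStart arr m := by
  induction m with
  | zero => intro j h1 _; interval_cases j; rfl
  | succ m ih =>
    intro j h1 h2
    by_cases hb : pvBad arr (m + 1)
    · have hst : pvStart arr (m + 1) = m + 1 := by rw [pvStart_succ]; simp [hb]
      rw [hst] at h2 ⊢
      have : j = m + 1 := by omega
      rw [this, hst]
    · have hst : pvStart arr (m + 1) = pvStart arr m := by rw [pvStart_succ]; simp [hb]
      rw [hst] at h2 ⊢
      rcases Nat.lt_or_ge j (m + 1) with h | h
      · exact ih j (by omega) h2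
      · have : j = m + 1 := by omega
        rw [this, hst]

theorem pvBs_succ (arr : List Int) (m : Nat) :
    pvBs arr (m + 1) = pvBs arr m ++ (if pvBad arr (m + 1) then [((m + 1 : Nat) : Int)] else []) := by
  unfold pvBs
  have h1 : ((m + 1 : Nat) : Int) + 1 = ((m : Int) + 1) + 1 := by push_cast; ring
  rw [h1, PySem.List.pyRange_one_succ_right (by omega : (1 : Int) ≤ (m : Int) + 1),
    List.filter_append]
  congr 1
  have h2 : ((m : Int) + 1) = ((m + 1 : Nat) : Int) := by push_cast; ring
  rw [h2]
  simp only [List.filter, PySem.List.pyGetD_natCast,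
    (by push_cast; ring : ((m + 1 : Nat) : Int) - 1 = ((m : Nat) : Int)), decide_eq_true_eq]
  unfold pvBad
  have h3 : (m + 1) - 1 = m := by omega
  rw [h3]
  cases h : decide (0 ≤ arr.getD (m + 1) 0 * arr.getD m 0) <;> simp [h]

theorem pv_zip_tail_concat (l : List Int) (h : l ≠ []) (x : Int) :
    ((l ++ [x]).zip ((l ++ [x]).tail)) = (l.zip l.tail) ++ [(l.getLast h, x)] := by
  induction l with
  | nil => exact absurd rfl h
  | cons a l ih =>
    cases l with
    | nil => simp [List.zip]
    | cons b t =>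
      have := ih (List.cons_ne_nil _ _)
      simp only [List.cons_append, List.tail_cons, List.zip_cons_cons] at this ⊢
      rw [this]
      simp [List.getLast]

theorem pvLexLe_trans {a b c : Int × Int} (h1 : pvLexLe a b) (h2 : pvLexLe b c) : pvLexLe a c := by
  obtain ⟨a1, a2⟩ := a; obtain ⟨b1, b2⟩ := b; obtain ⟨c1, c2⟩ := c
  simp only [pvLexLe] at *; omega

theorem pvLexLe_antisymm {a b : Int × Int} (h1 : pvLexLe a b) (h2 : pvLexLe b a) : a = b := by
  obtain ⟨a1, a2⟩ := a; obtain ⟨b1, b2⟩ := b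
  simp only [pvLexLe, Prod.mk.injEq] at *; omega

-- the internal fold step of PySem.List.max2? with fst/snd keys
def pvMaxStep (acc : Option (Int × Int)) (x : Int × Int) : Option (Int × Int) :=
  match acc with
  | none => some x
  | some m => if (decide (m.1 < x.1) || !decide (x.1 < m.1) && decide (m.2 < x.2)) = true then some x else some m

theorem pv_max2_eq (l : List (Int × Int)) :
    PySem.List.max2? l (fun p => p.1) (fun p => p.2) = l.foldl pvMaxStep none := by
  unfold PySem.List.max2?
  congr 1
  funext acc x
  cases acc <;> rfl

theorem pv_max2_aux (t : List (Int × Int)) :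
    ∀ m : Int × Int, ∃ p, t.foldl pvMaxStep (some m) = some p ∧ (p = m ∨ p ∈ t) ∧ pvLexLe m p ∧
      ∀ q ∈ t, pvLexLe q p := by
  induction t with
  | nil => intro m; exact ⟨m, rfl, Or.inl rfl, Or.inr ⟨rfl, le_refl _⟩, by simp⟩
  | cons x t ih =>
    intro m
    rw [List.foldl_cons]
    by_cases hc : (decide (m.1 < x.1) || !decide (x.1 < m.1) && decide (m.2 < x.2)) = true
    · have hstep : pvMaxStep (some m) x = some x := by simp [pvMaxStep, hc]
      rw [hstep]
      obtain ⟨p, hfold, hmem, hle, hall⟩ := ih x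
      have hmx : pvLexLe m x := by
        obtain ⟨m1, m2⟩ := m; obtain ⟨x1, x2⟩ := x
        simp only [Bool.or_eq_true, Bool.and_eq_true, Bool.not_eq_true', decide_eq_true_eq,
          decide_eq_false_iff_not, pvLexLe] at hc ⊢
        omega
      refine ⟨p, hfold, ?_, pvLexLe_trans hmx hle, ?_⟩
      · rcases hmem with h | h
        · exact Or.inr (h ▸ List.mem_cons_self)
        · exact Or.inr (List.mem_cons_of_mem _ h)
      · intro q hq
        rcases List.mem_cons.mp hq with h | h
        · exact h ▸ hle
        · exact hall q h
    · have hstep : pvMaxStep (some m) x = some m := by simp [pvMaxStep, hc]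
      rw [hstep]
      obtain ⟨p, hfold, hmem, hle, hall⟩ := ih m
      have hxm : pvLexLe x m := by
        obtain ⟨m1, m2⟩ := m; obtain ⟨x1, x2⟩ := x
        simp only [Bool.or_eq_true, Bool.and_eq_true, Bool.not_eq_true', decide_eq_true_eq,
          decide_eq_false_iff_not, pvLexLe] at hc ⊢
        omega
      refine ⟨p, hfold, ?_, hle, ?_⟩
      · rcases hmem with h | h
        · exact Or.inl h
        · exact Or.inr (List.mem_cons_of_mem _ h)
      · intro q hq
        rcases List.mem_cons.mp hq with h | h
        · exact h ▸ pvLexLe_trans hxm hle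
        · exact hall q h

theorem pv_max2_spec (l : List (Int × Int)) (h : l ≠ []) :
    ∃ p, PySem.List.max2? l (fun p => p.1) (fun p => p.2) = some p ∧ p ∈ l ∧ ∀ q ∈ l, pvLexLe q p := by
  cases l with
  | nil => exact absurd rfl h
  | cons x t =>
    rw [pv_max2_eq, List.foldl_cons]
    have hstep : pvMaxStep none x = some x := rfl
    rw [hstep]
    obtain ⟨p, hfold, hmem, hle, hall⟩ := pv_max2_aux t x
    refine ⟨p, hfold, ?_, ?_⟩
    · rcases hmem with h | h
      · exact h ▸ List.mem_cons_self
      · exact List.mem_cons_of_mem _ h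
    · intro q hq
      rcases List.mem_cons.mp hq with h | h
      · exact h ▸ hle
      · exact hall q h

-- the key step: feeding the closing segment (start m, m+1) into B's fold step
theorem pv_step (arr : List Int) (m : Nat) (st : Int × Int)
    (h : pvGood arr (pvStart arr m) st) :
    pvGood arr (m + 1) (pvStepB st ((pvStart arr m : Int), ((m + 1 : Nat) : Int))) := by
  obtain ⟨L, E⟩ := st
  set s := pvStart arr m with hs
  have hsle : s ≤ m := pvStart_le arr m
  have hseg : ∀ j, s ≤ j → j ≤ m → pvDp arr j = if j = s then 0 else ((j - s : Nat) : Int) + 1 := by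
    intro j h1 h2
    rw [pvDp_eq, pvStart_eq_of_le arr m j h2 h1, ← hs]
  simp only [pvStepB, pvGood] at h ⊢
  by_cases hc : 2 ≤ ((m + 1 : Nat) : Int) - (s : Int) ∧ L ≤ ((m + 1 : Nat) : Int) - (s : Int)
  · rw [if_pos hc]
    right
    have hsm : ¬ (m = s) := by omega
    refine ⟨hc.1, m, by push_cast; ring, by omega, ?_, ?_⟩
    · rw [hseg m hsle (le_refl m), if_neg hsm]; push_cast; omega
    · intro j hj
      rcases Nat.lt_or_ge j s with hjs | hjs
      · rcases h with ⟨h1, h2, h3⟩ | ⟨h1, jE, hE, hjE, hdp, hall⟩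
        · rw [h3 j hjs]; left; omega
        · refine pvLexLe_trans (hall j hjs) ?_
          simp only [pvLexLe]; omega
      · rw [hseg j hjs (by omega)]
        simp only [pvLexLe]
        split <;> omega
  · rw [if_neg hc]
    rcases h with ⟨h1, h2, h3⟩ | ⟨h1, jE, hE, hjE, hdp, hall⟩
    · have hsm : s = m := by omega
      left
      refine ⟨h1, h2, ?_⟩
      intro j hj
      rcases Nat.lt_or_ge j s with hh | hh
      · exact h3 j hh
      · have hjm : j = m := by omega
        rw [hjm, hseg m hsle (le_refl m), if_pos hsm.symm]
    · right
      refine ⟨h1, jE, hE, by omega, hdp, ?_⟩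
      intro j hj
      rcases Nat.lt_or_ge j s with hh | hh
      · exact hall j hh
      · rw [hseg j hh (by omega)]
        simp only [pvLexLe]
        split <;> [left; left] <;> omega

theorem pv_zip_concat_cons (a : Int) (t : List Int) (x : Int) :
    ((a :: (t ++ [x])).zip (t ++ [x])) = ((a :: t).zip t) ++ [((a :: t).getLast (List.cons_ne_nil _ _), x)] := by
  simpa using pv_zip_tail_concat (a :: t) (List.cons_ne_nil _ _) x

theorem pv_inv (arr : List Int) (m : Nat) :
    pvLast arr m = ((pvStart arr m : Nat) : Int) ∧ pvGood arr (pvStart arr m) (pvInner arr m) := by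
  induction m with
  | zero =>
    have hbs : pvBs arr 0 = [] := by
      unfold pvBs
      rw [show ((0 : Nat) : Int) + 1 = 1 by norm_num, PySem.List.pyRange_one_eq_nil (le_refl 1)]
      rfl
    constructor
    · simp [pvLast, hbs, pvStart]
    · unfold pvInner
      rw [hbs]
      show pvGood arr (pvStart arr 0) (0, 0)
      left
      exact ⟨rfl, rfl, fun j hj => absurd hj (by simp [pvStart])⟩
  | succ m ih =>
    obtain ⟨ihL, ihG⟩ := ih
    by_cases hb : pvBad arr (m + 1)
    · have hbs : pvBs arr (m + 1) = pvBs arr m ++ [((m + 1 : Nat) : Int)] := by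
        rw [pvBs_succ, if_pos hb]
      have hlast : pvLast arr (m + 1) = ((m + 1 : Nat) : Int) := by
        unfold pvLast
        simp only [hbs]
        simp [List.getLast_append]
      have hinner : pvInner arr (m + 1) = pvStepB (pvInner arr m) (pvLast arr m, ((m + 1 : Nat) : Int)) := by
        unfold pvInner pvLast
        simp only [hbs]
        rw [pv_zip_concat_cons, List.foldl_append]
        rfl
      have hstart : pvStart arr (m + 1) = m + 1 := by rw [pvStart_succ, if_pos hb]
      rw [hlast, hinner, ihL, hstart]
      exact ⟨rfl, pv_step arr m _ ihG⟩
    · have hbs : pvBs arr (m + 1) = pvBs arr m := by rw [pvBs_succ, if_neg hb]; simp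
      have hstart : pvStart arr (m + 1) = pvStart arr m := by rw [pvStart_succ, if_neg hb]
      unfold pvLast pvInner
      simp only [hbs, hstart]
      exact ⟨ihL, ihG⟩

-- A's dp fold builds exactly the pvDp table
theorem pv_set_map_range (f : Nat → Int) (n m : Nat) (v : Int) (hm : m < n) :
    ((List.range n).map f).set m v = (List.range n).map (fun j => if j = m then v else f j) := by
  apply List.ext_getElem
  · simp
  · intro i hi hi2
    by_cases h : i = m
    · subst h; simp
    · simp [List.getElem_set, h]
      intro hmi; exact absurd hmi.symm h

theorem pv_map_zero (arr : List Int) (g : Nat → Int) (hg : ∀ j, j < arr.length → g j = 0) :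
    List.replicate arr.length (0 : Int) = (List.range arr.length).map g := by
  rw [show List.replicate arr.length (0 : Int) = (List.range arr.length).map (fun _ => 0) by
    rw [List.map_const']; simp]
  exact List.map_congr_left (fun j hj => (hg j (List.mem_range.mp hj)).symm)

theorem pv_foldA (arr : List Int) (m : Nat) (hm : m ≤ arr.length) :
    (PySem.List.pyRange 1 (m : Int) 1).foldl (pvStepA arr) (List.replicate arr.length 0)
      = (List.range arr.length).map (fun j => if j < m then pvDp arr j else 0) := by
  induction m with
  | zero =>
    rw [PySem.List.pyRange_one_eq_nil (by norm_num)]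
    exact pv_map_zero arr _ (fun j _ => by simp)
  | succ m ih =>
    rcases Nat.eq_zero_or_pos m with rfl | hmpos
    · rw [show ((0 + 1 : Nat) : Int) = 1 by norm_num, PySem.List.pyRange_one_eq_nil (le_refl 1)]
      refine pv_map_zero arr _ (fun j _ => ?_)
      by_cases h : j < 0 + 1
      · rw [if_pos h, show j = 0 by omega]; rfl
      · rw [if_neg h]
    · obtain ⟨k, rfl⟩ : ∃ k, m = k + 1 := ⟨m - 1, by omega⟩
      have hcast : ((k + 1 + 1 : Nat) : Int) = ((k + 1 : Nat) : Int) + 1 := by push_cast; ring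
      rw [hcast, PySem.List.pyRange_one_succ_right (by push_cast; omega), List.foldl_append,
        ih (by omega)]
      simp only [List.foldl_cons, List.foldl_nil]
      unfold pvStepA
      have e1 : ((k + 1 : Nat) : Int) - 1 = ((k : Nat) : Int) := by push_cast; ring
      rw [e1, PySem.List.pyGetD_natCast arr (k + 1),
        PySem.List.pyGetD_natCast arr k, PySem.List.pyGetD_natCast _ k,
        PySem.List.getD_map_range _ _ _ _ (by omega : k < arr.length),
        if_pos (Nat.lt_succ_self k)]
      have key : ∀ v : Int, v = pvDp arr (k + 1) →
          ((List.range arr.length).map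
              (fun j => if j < k + 1 then pvDp arr j else 0)).set (k + 1) v
            = (List.range arr.length).map (fun j => if j < k + 1 + 1 then pvDp arr j else 0) := by
        intro v hv
        rw [pv_set_map_range _ _ _ _ (by omega : k + 1 < arr.length)]
        refine List.map_congr_left (fun j _ => ?_)
        by_cases h1 : j = k + 1
        · subst h1; rw [if_pos rfl, if_pos (by omega), hv]
        · rw [if_neg h1]
          by_cases h2 : j < k + 1
          · rw [if_pos h2, if_pos (by omega)]
          · rw [if_neg h2, if_neg (by omega)]
      by_cases hcond : arr.getD (k + 1) 0 * arr.getD k 0 < 0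
      · have hfalse : pvBad arr (k + 1) = false := by
          unfold pvBad
          simp only [Nat.add_sub_cancel]
          exact decide_eq_false (not_le.mpr hcond)
        rw [if_pos hcond]
        by_cases hz : pvDp arr k = 0
        · rw [if_pos hz, PySem.List.pySetD_natCast]
          refine key 2 ?_
          rw [pvDp_succ, hfalse]
          simp only [Bool.false_eq_true, if_false]
          rw [if_pos hz]
        · rw [if_neg hz, PySem.List.pySetD_natCast]
          refine key _ ?_
          rw [pvDp_succ, hfalse]
          simp only [Bool.false_eq_true, if_false]
          rw [if_neg hz]
      · have htrue : pvBad arr (k + 1) = true := by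
          unfold pvBad
          simp only [Nat.add_sub_cancel]
          exact decide_eq_true (not_lt.mp hcond)
        rw [if_neg hcond, PySem.List.pySetD_natCast]
        refine key 0 ?_
        rw [pvDp_succ, htrue, if_pos rfl]

-- A's enumerate-and-swap massage into the (value, index) pair list
theorem pv_A_pairs (arr : List Int) :
    (PySem.List.enumerate ((List.range arr.length).map (fun j => pvDp arr j)) 0).map (fun p => (p.2, p.1))
      = (List.range arr.length).map (fun j => (pvDp arr j, (j : Int))) := by
  rw [PySem.List.enumerate_eq_map_pyRange _ 0]
  simp only [PySem.List.len_eq, List.length_map, List.length_range]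
  rw [PySem.List.pyRange_zero_natCast]
  simp only [List.map_map]
  refine List.map_congr_left (fun j hj => ?_)
  have hjn : j < arr.length := List.mem_range.mp hj
  simp only [Function.comp]
  rw [PySem.List.pyGetD_natCast, PySem.List.getD_map_range _ _ _ _ hjn]

-- ===== VERDICT (by name: the statement is the Claim_ definition above) =====
theorem longest_alt_subarray_spec : Claim_equal_longest_alt_subarray := by
  unfold Claim_equal_longest_alt_subarray Spec_longest_alt_subarray Pre_longest_alt_subarray
  intro arr _ hpre
  have hn : 1 ≤ arr.length := List.length_pos_iff.mpr hpre
  -- A side: dp table and lexicographic max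
  simp only [longest_alt_subarray, PySem.List.len_eq]
  rw [pv_foldA arr arr.length (le_refl _),
    List.map_congr_left (fun j hj => if_pos (List.mem_range.mp hj) :
      ∀ j ∈ List.range arr.length,
        (if j < arr.length then pvDp arr j else 0) = (fun j => pvDp arr j) j),
    pv_A_pairs]
  obtain ⟨p, hmax, hpmem, hpall⟩ := pv_max2_spec
    ((List.range arr.length).map (fun j => (pvDp arr j, (j : Int)))) (by simp; omega)
  rw [hmax]
  -- B side: segment fold
  simp only [longest_alt_subarray_alt, PySem.List.len_eq, PySem.List.slice_from_one]
  have hbs : (PySem.List.pyRange 1 (arr.length : Int) 1).filter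
      (fun i => decide (0 ≤ PySem.List.pyGetD arr i 0 * PySem.List.pyGetD arr (i - 1) 0))
      = pvBs arr (arr.length - 1) := by
    unfold pvBs
    rw [show ((arr.length - 1 : Nat) : Int) + 1 = (arr.length : Int) by omega]
  rw [hbs]
  have hcuts : ([(0 : Int)] ++ pvBs arr (arr.length - 1) ++ [(arr.length : Int)])
      = (0 : Int) :: (pvBs arr (arr.length - 1) ++ [(arr.length : Int)]) := by simp
  rw [hcuts, List.tail_cons, pv_zip_concat_cons, List.foldl_append]
  simp only [List.foldl_cons, List.foldl_nil]
  obtain ⟨hL, hG⟩ := pv_inv arr (arr.length - 1)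
  have hGn := pv_step arr (arr.length - 1) _ hG
  rw [show (arr.length - 1) + 1 = arr.length by omega] at hGn
  show PySem.List.slice arr (some (p.2 - p.1 + 1)) (some (p.2 + 1)) = _
  rw [show ((0 : Int) :: pvBs arr (arr.length - 1)).getLast (List.cons_ne_nil _ _)
      = pvLast arr (arr.length - 1) from rfl, hL]
  rw [show List.foldl pvStepB (0, 0) ((0 :: pvBs arr (arr.length - 1)).zip (pvBs arr (arr.length - 1)))
      = pvInner arr (arr.length - 1) from rfl]
  set st := pvStepB (pvInner arr (arr.length - 1))
    (((pvStart arr (arr.length - 1) : Nat) : Int), (arr.length : Int)) with hst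
  rcases hGn with ⟨h1, h2, h3⟩ | ⟨h1, jE, hE, hjE, hdp, hall⟩
  · -- no alternating pair anywhere: A picks (0, n-1), both return []
    rw [if_pos (by omega : st.1 < 2)]
    obtain ⟨j, hjmem, hpj⟩ := List.mem_map.mp hpmem
    have hjn : j < arr.length := List.mem_range.mp hjmem
    have hq : ((pvDp arr (arr.length - 1), ((arr.length - 1 : Nat) : Int)) :
        Int × Int) ∈ (List.range arr.length).map (fun j => (pvDp arr j, (j : Int))) :=
      List.mem_map.mpr ⟨arr.length - 1, List.mem_range.mpr (by omega), rfl⟩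
    have hle := hpall _ hq
    rw [h3 (arr.length - 1) (by omega)] at hle
    rw [h3 j hjn] at hpj
    have hj1 : j = arr.length - 1 := by
      rcases hle with h | ⟨_, h⟩ <;> rw [← hpj] at h <;> simp at h <;> omega
    rw [← hpj, hj1]
    rw [show (((arr.length - 1 : Nat) : Int) - 0 + 1) = ((arr.length : Nat) : Int) by omega,
      show (((arr.length - 1 : Nat) : Int) + 1) = ((arr.length : Nat) : Int) by omega,
      PySem.List.slice_natCast]
    simp
  · -- a longest segment exists: A's max pair equals B's (length, end)
    rw [if_neg (by omega : ¬ st.1 < 2)]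
    have hq0 : ((pvDp arr jE, (jE : Int)) : Int × Int)
        ∈ (List.range arr.length).map (fun j => (pvDp arr j, (j : Int))) :=
      List.mem_map.mpr ⟨jE, List.mem_range.mpr hjE, rfl⟩
    have hle1 : pvLexLe (st.1, st.2) p := by
      have := hpall _ hq0
      rwa [hdp, ← hE] at this
    have hle2 : pvLexLe p (st.1, st.2) := by
      obtain ⟨j, hjmem, hpj⟩ := List.mem_map.mp hpmem
      have := hall j (List.mem_range.mp hjmem)
      rw [hpj] at this
      exact this
    have hpst : p = (st.1, st.2) := pvLexLe_antisymm hle2 hle1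
    rw [hpst]
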